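-- pv_equiv track=rewrite | github.com/KNTTN/JugglingSiteswaps | main.py | expand_siteswap
-- ===== SOURCE A (Python) =====
-- import itertools
--
-- def expand_siteswap(original_list, max_value, target_sum):
--     n = len(original_list)
--     all_combinations = []
--
--     # Generate all possible combinations of values within the range 0 to max_value
--     # We only care about combinations where each element satisfies the modulo condition
--     # We use itertools.product to generate the Cartesian product of possible values
--     for combo in itertools.product(range(max_value + 1), repeat=n):
--         if (all(combo[i] % n == original_list[i] % n for i in range(n)) and
--             sum(combo) == target_sum):
--             all_combinations.append(list(combo))
--
--     return all_combinations
-- ===== SOURCE B (Python) =====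
-- def expand_siteswap(original_list, max_value, target_sum):
--     # Enumerate only per-position mod-valid candidates instead of all (max_value+1)^n tuples.
--     n = len(original_list)
--     if n == 0:
--         return [[]] if target_sum == 0 else []
--     candidates = [list(range(r % n, max_value + 1, n)) for r in original_list]
--
--     out = []
--
--     def rec(i, remaining, acc):
--         if i == n:
--             if remaining == 0:
--                 out.append(acc[:])
--             return
--         for v in candidates[i]:
--             acc.append(v)
--             rec(i + 1, remaining - v, acc)
--             acc.pop()
--
--     rec(0, target_sum, [])
--     return out
-- ===== Notes on version B (the rewrite author's own statement) =====
-- stated objective: faster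
-- what changed: A filters the full Cartesian product range(max_value+1)^n by the per-index modulo condition and the sum; B precomputes per position only the values congruent to original_list[i] mod n (an arithmetic-progression range) and backtracks over those, checking the sum at the leaves. Intended as asymptotically faster; a timing run read B 764x faster at the largest size both finished but could not confirm it (A timed out on most inputs of that size).
import Mathlib
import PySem

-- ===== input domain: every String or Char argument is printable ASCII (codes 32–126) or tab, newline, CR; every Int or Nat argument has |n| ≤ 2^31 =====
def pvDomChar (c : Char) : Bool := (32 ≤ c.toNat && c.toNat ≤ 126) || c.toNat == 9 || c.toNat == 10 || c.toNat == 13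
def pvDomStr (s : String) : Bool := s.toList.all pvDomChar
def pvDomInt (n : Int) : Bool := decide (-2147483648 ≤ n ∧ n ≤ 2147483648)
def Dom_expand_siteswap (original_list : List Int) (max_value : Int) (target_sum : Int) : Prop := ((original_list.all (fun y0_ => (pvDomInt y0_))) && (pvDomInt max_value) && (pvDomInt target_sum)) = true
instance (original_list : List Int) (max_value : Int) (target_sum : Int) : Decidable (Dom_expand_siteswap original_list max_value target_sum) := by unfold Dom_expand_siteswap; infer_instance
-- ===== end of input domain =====

-- B enumerates only the per-position mod-valid candidate values (arithmetic progressions) and backtracks with a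
-- running remaining sum, instead of filtering the full (max_value+1)^n product: intended as faster (a timing run
-- read B 764x at the largest size both finished, but could not confirm it since A timed out on most inputs there).


-- ===== PORT A =====
-- itertools.product(range(max_value+1), repeat=n), first coordinate varying slowest
def pyProdRep (vals : List Int) : Nat → List (List Int)
  | 0 => [[]]
  | Nat.succ k => vals.flatMap (fun v => (pyProdRep vals k).map (fun c => v :: c))

-- literal port of A; combo[i] / original_list[i] via pyGetD (indices i < n are always in range here)
def expand_siteswap (original_list : List Int) (max_value : Int) (target_sum : Int) : List (List Int) :=
  (pyProdRep (PySem.List.pyRange 0 (max_value + 1) 1) original_list.length).foldl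
    (fun acc combo =>
      if ((List.range original_list.length).all (fun i =>
            PySem.Int.mod (PySem.List.pyGetD combo (i : Int) 0) (original_list.length : Int)
              == PySem.Int.mod (PySem.List.pyGetD original_list (i : Int) 0) (original_list.length : Int))
          && (combo.sum == target_sum))
      then acc ++ [combo] else acc) []

-- ===== PORT B =====
-- backtracking over per-position candidate lists with the remaining target sum
def altRec : List (List Int) → Int → List (List Int)
  | [], remaining => if remaining == 0 then [[]] else []
  | c :: cs, remaining => c.flatMap (fun v => (altRec cs (remaining - v)).map (fun t => v :: t))

def expand_siteswap_alt (original_list : List Int) (max_value : Int) (target_sum : Int) : List (List Int) :=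
  if original_list.length == 0 then (if target_sum == 0 then [[]] else [])
  else
    altRec (original_list.map (fun r =>
      PySem.List.pyRange (PySem.Int.mod r (original_list.length : Int)) (max_value + 1)
        (original_list.length : Int))) target_sum

-- ===== PRECONDITION & SPEC =====
def Spec_expand_siteswap (original_list : List Int) (max_value : Int) (target_sum : Int) (out : List (List Int)) : Prop := out = expand_siteswap_alt original_list max_value target_sum
instance (original_list : List Int) (max_value : Int) (target_sum : Int) (out : List (List Int)) : Decidable (Spec_expand_siteswap original_list max_value target_sum out) := by unfold Spec_expand_siteswap; infer_instance

-- ===== CLAIM (what is proved, stated in full; the proofs are below) =====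
def Claim_equal_expand_siteswap : Prop := ∀ (original_list : List Int) (max_value : Int) (target_sum : Int), Dom_expand_siteswap original_list max_value target_sum → Spec_expand_siteswap original_list max_value target_sum (expand_siteswap original_list max_value target_sum)

-- ===== LEMMAS AND PROOFS =====

-- plain Cartesian product of a list of candidate lists (proof-side helper)
def prodOf : List (List Int) → List (List Int)
  | [] => [[]]
  | c :: cs => c.flatMap (fun v => (prodOf cs).map (fun t => v :: t))

theorem altRec_eq_filter (cs : List (List Int)) (rem : Int) :
    altRec cs rem = (prodOf cs).filter (fun c => c.sum == rem) := by
  induction cs generalizing rem with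
  | nil =>
      by_cases h : rem = 0
      · simp [altRec, prodOf, h]
      · have h0 : ((0 : Int) == rem) = false := by rw [beq_eq_false_iff_ne]; omega
        have h1 : (rem == (0 : Int)) = false := by rw [beq_eq_false_iff_ne]; omega
        simp [altRec, prodOf, h0, h1]
  | cons c cs ih =>
      simp only [altRec, prodOf]
      rw [List.filter_flatMap]
      refine List.flatMap_congr (fun v _ => ?_)
      rw [List.filter_map, ih (rem - v)]
      congr 1
      apply List.filter_congr
      intro t _
      show (List.sum t == rem - v) = ((v :: t).sum == rem)
      simp only [List.sum_cons]
      by_cases h : t.sum = rem - v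
      · have h2 : v + t.sum = rem := by omega
        simp [h]
      · have h2 : ¬ (v + t.sum = rem) := by omega
        simp [h, h2]

theorem flatMap_if_filter (xs : List Int) (q : Int → Bool) (f : Int → List (List Int)) :
    xs.flatMap (fun v => if q v then f v else []) = (xs.filter q).flatMap f := by
  induction xs with
  | nil => rfl
  | cons x xs ih =>
      by_cases h : q x <;> simp [h, ih]

theorem prodOf_map_filter (vals : List Int) (p : Int → Int → Bool) (os : List Int) :
    prodOf (os.map (fun r => vals.filter (fun v => p v r))) =
      (pyProdRep vals os.length).filter (fun c => (c.zip os).all (fun x => p x.1 x.2)) := by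
  induction os with
  | nil => rfl
  | cons r os ih =>
      simp only [List.map_cons, prodOf, List.length_cons, pyProdRep]
      rw [List.filter_flatMap]
      rw [← flatMap_if_filter vals (fun v => p v r)]
      refine List.flatMap_congr (fun v _ => ?_)
      rw [List.filter_map]
      by_cases h : p v r
      · simp only [h, if_true, ih]
        congr 1
        apply List.filter_congr
        intro t _
        show ((t.zip os).all (fun x => p x.1 x.2)) = (((v :: t).zip (r :: os)).all (fun x => p x.1 x.2))
        simp [h]
      · have hcomp : (fun c => ((c.zip (r :: os)).all (fun x => p x.1 x.2))) ∘ (fun t => v :: t)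
            = fun _ => false := by
          funext t; simp [h]
        rw [hcomp, List.filter_false, List.map_nil]
        simp [h]

theorem length_mem_pyProdRep (vals : List Int) (k : Nat) (c : List Int)
    (hc : c ∈ pyProdRep vals k) : c.length = k := by
  induction k generalizing c with
  | zero => simp [pyProdRep] at hc; simp [hc]
  | succ k ih =>
      simp only [pyProdRep, List.mem_flatMap, List.mem_map] at hc
      obtain ⟨v, _, t, ht, rfl⟩ := hc
      simp [ih t ht]

theorem all_range_getD (g : Int → Int → Bool) :
    ∀ (ol combo : List Int), combo.length = ol.length →
      ((List.range ol.length).all (fun i => g (combo.getD i 0) (ol.getD i 0)))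
        = (combo.zip ol).all (fun x => g x.1 x.2) := by
  intro ol
  induction ol with
  | nil => intro combo h; simp
  | cons r os ih =>
      intro combo h
      cases combo with
      | nil => simp at h
      | cons v c =>
          have hlen : c.length = os.length := by simpa using h
          rw [List.length_cons, List.range_succ_eq_map, List.zip_cons_cons, List.all_cons,
            List.all_cons, List.all_map]
          simp only [List.getD_cons_zero]
          congr 1
          have hfun : ((fun i => g ((v :: c).getD i 0) ((r :: os).getD i 0)) ∘ Nat.succ)
              = fun i => g (c.getD i 0) (os.getD i 0) := by
            funext i; simp [Function.comp]
          rw [hfun, ih c hlen]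

-- a mod-valid candidate range IS a filter of the full step-1 range
theorem pyRange_mod_filter (n : Int) (hn : 0 < n) (s b : Int) (hs0 : 0 ≤ s) (hsn : s < n) :
    PySem.List.pyRange s b n
      = (PySem.List.pyRange 0 b 1).filter (fun v => PySem.Int.mod v n == s) := by
  have hnodup1 : (PySem.List.pyRange s b n).Nodup := by
    rw [PySem.List.pyRange_of_pos _ _ hn]
    refine List.Nodup.map ?_ (List.nodup_range)
    intro a b hab
    have h1 := sub_eq_zero.mpr hab
    have h2 : n * ((a : Int) - b) = 0 := by push_cast at h1 ⊢; linarith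
    have := mul_eq_zero.mp h2
    omega
  have hsort1 : (PySem.List.pyRange s b n).Pairwise (· < ·) := by
    rw [PySem.List.pyRange_of_pos _ _ hn]
    refine List.Pairwise.map _ ?_ (List.pairwise_lt_range)
    intro a b hab
    have : n * (a : Int) < n * b := by
      apply mul_lt_mul_of_pos_left _ hn
      exact_mod_cast hab
    linarith
  have hnodup2 : ((PySem.List.pyRange 0 b 1).filter (fun v => PySem.Int.mod v n == s)).Nodup :=
    (PySem.List.nodup_pyRange_one 0 b).filter _
  have hsort2 : ((PySem.List.pyRange 0 b 1).filter (fun v => PySem.Int.mod v n == s)).Pairwise (· < ·) :=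
    List.Pairwise.sublist List.filter_sublist (PySem.List.pairwise_lt_pyRange_one 0 b)
  have hmem : ∀ x : Int, x ∈ PySem.List.pyRange s b n ↔
      x ∈ (PySem.List.pyRange 0 b 1).filter (fun v => PySem.Int.mod v n == s) := by
    intro x
    rw [PySem.List.mem_pyRange_iff_of_pos hn]
    simp only [List.mem_filter, PySem.List.mem_pyRange_one, beq_iff_eq,
      PySem.Int.mod_eq_emod_of_pos hn]
    constructor
    · rintro ⟨h1, h2, k, hk⟩
      refine ⟨⟨by omega, h2⟩, ?_⟩
      have hx : x = s + n * k := by omega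
      rw [hx, Int.add_mul_emod_self_left]
      exact Int.emod_eq_of_lt hs0 hsn
    · rintro ⟨⟨h0, h2⟩, hmod⟩
      have hdvd : n ∣ x - s := by
        have hz : (x - s) % n = 0 := by
          rw [Int.sub_emod, hmod, Int.emod_eq_of_lt hs0 hsn, sub_self, Int.zero_emod]
        exact Int.dvd_of_emod_eq_zero hz
      refine ⟨?_, h2, hdvd⟩
      by_contra hxs
      obtain ⟨k, hk⟩ := hdvd
      have hkneg : k < 0 := by
        by_contra hk0
        have : 0 ≤ n * k := mul_nonneg (by omega) (by omega)
        omega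
      have : n * k ≤ n * (-1) := by
        apply mul_le_mul_of_nonneg_left _ (by omega)
        omega
      omega
  exact ((List.perm_ext_iff_of_nodup hnodup1 hnodup2).mpr hmem).eq_of_pairwise
    (fun a b _ _ hab hba => absurd hba (lt_asymm hab)) hsort1 hsort2

theorem expand_siteswap_eq_alt (original_list : List Int) (max_value : Int) (target_sum : Int) :
    expand_siteswap original_list max_value target_sum
      = expand_siteswap_alt original_list max_value target_sum := by
  cases original_list with
  | nil =>
      unfold expand_siteswap expand_siteswap_alt
      simp only [List.length_nil, pyProdRep, List.foldl, List.range_zero, List.all_nil,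
        Bool.true_and, List.sum_nil]
      by_cases h : target_sum = 0
      · subst h; simp
      · have h0 : ((0 : Int) == target_sum) = false := by rw [beq_eq_false_iff_ne]; omega
        have h1 : (target_sum == (0 : Int)) = false := by rw [beq_eq_false_iff_ne]; omega
        simp [h0, h1]
  | cons r rest =>
      unfold expand_siteswap
      rw [PySem.List.foldl_append_if _ (fun c => c)]
      rw [List.nil_append, List.map_id']
      have h1 : ∀ combo : List Int,
          (((List.range (r :: rest).length).all (fun i =>
              PySem.Int.mod (PySem.List.pyGetD combo (i : Int) 0) ((r :: rest).length : Int)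
                == PySem.Int.mod (PySem.List.pyGetD (r :: rest) (i : Int) 0) ((r :: rest).length : Int)))
            && (combo.sum == target_sum))
          = ((combo.sum == target_sum)
            && ((List.range (r :: rest).length).all (fun i =>
              PySem.Int.mod (PySem.List.pyGetD combo (i : Int) 0) ((r :: rest).length : Int)
                == PySem.Int.mod (PySem.List.pyGetD (r :: rest) (i : Int) 0) ((r :: rest).length : Int)))) := by
        intro combo; exact Bool.and_comm _ _
      rw [List.filter_congr (fun combo _ => h1 combo), ← List.filter_filter]
      have hzip : (pyProdRep (PySem.List.pyRange 0 (max_value + 1) 1) (r :: rest).length).filter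
            (fun combo => (List.range (r :: rest).length).all (fun i =>
              PySem.Int.mod (PySem.List.pyGetD combo (i : Int) 0) ((r :: rest).length : Int)
                == PySem.Int.mod (PySem.List.pyGetD (r :: rest) (i : Int) 0) ((r :: rest).length : Int)))
          = (pyProdRep (PySem.List.pyRange 0 (max_value + 1) 1) (r :: rest).length).filter
              (fun combo => (combo.zip (r :: rest)).all (fun x =>
                PySem.Int.mod x.1 ((r :: rest).length : Int) == PySem.Int.mod x.2 ((r :: rest).length : Int))) := by
        apply List.filter_congr
        intro c hc
        have hlen : c.length = (r :: rest).length :=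
          length_mem_pyProdRep _ _ c hc
        simp only [PySem.List.pyGetD_natCast]
        exact all_range_getD
          (fun a b => PySem.Int.mod a ((r :: rest).length : Int) == PySem.Int.mod b ((r :: rest).length : Int))
          (r :: rest) c hlen
      rw [hzip]
      rw [← prodOf_map_filter (PySem.List.pyRange 0 (max_value + 1) 1)
        (fun v w => PySem.Int.mod v ((r :: rest).length : Int) == PySem.Int.mod w ((r :: rest).length : Int))
        (r :: rest)]
      rw [← altRec_eq_filter]
      have hcands : (r :: rest).map (fun w => (PySem.List.pyRange 0 (max_value + 1) 1).filter (fun v =>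
            PySem.Int.mod v ((r :: rest).length : Int) == PySem.Int.mod w ((r :: rest).length : Int)))
          = (r :: rest).map (fun w =>
              PySem.List.pyRange (PySem.Int.mod w ((r :: rest).length : Int)) (max_value + 1)
                ((r :: rest).length : Int)) := by
        apply List.map_congr_left
        intro w _
        have hpos : (0 : Int) < ((r :: rest).length : Int) := by
          exact_mod_cast Nat.succ_pos rest.length
        exact (pyRange_mod_filter ((r :: rest).length : Int) hpos
          (PySem.Int.mod w ((r :: rest).length : Int)) (max_value + 1)
          (PySem.Int.mod_nonneg w hpos)
          (PySem.Int.mod_lt w hpos)).symm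
      rw [hcands]
      unfold expand_siteswap_alt
      have hne : (((r :: rest).length) == 0) = false := by
        rw [beq_eq_false_iff_ne]; simp
      simp only [hne, Bool.false_eq_true, if_false]

-- ===== VERDICT (by name: the statement is the Claim_ definition above) =====
theorem expand_siteswap_spec : Claim_equal_expand_siteswap := by
  intro ol mv ts _
  exact expand_siteswap_eq_alt ol mv ts
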